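-- pv_equiv track=rewrite | github.com/sfgeekgit/ml_dandylion_deepQ | main.py | spread_seeds
-- ===== SOURCE A (Python) =====
-- import copy
--
-- BOARD_WIDTH = 5
--
-- BOARD_HEIGHT = 5
--
-- def spread_seeds(board, direction):
--     new_board = copy.deepcopy(board)
--     for row in range(BOARD_HEIGHT):
--         for col in range(BOARD_WIDTH):
--             if board[row][col] == 1:
--                 dx, dy = direction
--                 new_row, new_col = row + dx, col + dy
--                 while 0 <= new_row < BOARD_HEIGHT and 0 <= new_col < BOARD_WIDTH:
--                     if new_board[new_row][new_col] == 0: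
--                         new_board[new_row][new_col] = 2
--                     new_row += dx
--                     new_col += dy
--     return new_board
-- ===== SOURCE B (Python) =====
-- BOARD_WIDTH = 5
--
-- BOARD_HEIGHT = 5
--
-- def spread_seeds(board, direction):
--     dx, dy = direction
--     new_board = [row[:] for row in board]
--     for r in range(BOARD_HEIGHT):
--         for c in range(BOARD_WIDTH):
--             if board[r][c] == 0:
--                 # pull: walk backward from (r, c) looking for a seed that reaches it
--                 for k in range(1, 5):
--                     pr, pc = r - k * dx, c - k * dy
--                     if not (0 <= pr < BOARD_HEIGHT and 0 <= pc < BOARD_WIDTH):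
--                         break
--                     if board[pr][pc] == 1:
--                         new_board[r][c] = 2
--                         break
--     return new_board
-- ===== Notes on version B (the rewrite author's own statement) =====
-- stated objective: alternative
-- what changed: B pulls instead of pushes: for each originally-empty cell it scans backward along the direction (at most 4 bounded steps) for a seed and marks only that cell, instead of A's forward walk from every seed that mutates cells all along each ray.
import Mathlib
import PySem

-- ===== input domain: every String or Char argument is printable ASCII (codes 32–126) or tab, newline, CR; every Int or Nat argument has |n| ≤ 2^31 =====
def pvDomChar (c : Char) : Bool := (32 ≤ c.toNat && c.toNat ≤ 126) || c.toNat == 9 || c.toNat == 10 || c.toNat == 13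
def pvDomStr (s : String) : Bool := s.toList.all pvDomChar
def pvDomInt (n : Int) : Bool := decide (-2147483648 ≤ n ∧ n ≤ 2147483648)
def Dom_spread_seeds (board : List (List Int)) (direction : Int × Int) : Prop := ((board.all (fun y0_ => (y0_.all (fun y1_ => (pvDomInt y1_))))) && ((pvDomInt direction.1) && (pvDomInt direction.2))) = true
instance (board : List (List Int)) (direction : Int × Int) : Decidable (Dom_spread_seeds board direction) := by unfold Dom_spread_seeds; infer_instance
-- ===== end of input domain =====

-- B re-implements spread_seeds by pulling: each originally-empty cell scans backward along the
-- direction (at most 4 bounded steps) for a seed reaching it and marks only itself, instead of A's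
-- push that walks forward from every seed marking cells along the ray; neither mutates the input.

-- shared small helpers (both ports index a 5×5 grid of Ints)
def inb (r c : Int) : Bool := decide (0 ≤ r) && decide (r < 5) && decide (0 ≤ c) && decide (c < 5)
def get2 (b : List (List Int)) (r c : Int) : Int := (b.getD r.toNat []).getD c.toNat 0
def set2 (b : List (List Int)) (r c : Int) (v : Int) : List (List Int) :=
  b.set r.toNat ((b.getD r.toNat []).set c.toNat v)

-- ===== PORT A =====
-- A's inner while loop.  Fuel 10 is a totalization guard only: whenever Python's while terminates
-- (which Pre_ guarantees) it makes at most 5 in-bounds steps, so the guard is never hit on Pre_.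
def whileA (dx dy : Int) : Nat → Int → Int → List (List Int) → List (List Int)
  | 0, _, _, nb => nb
  | f + 1, nr, nc, nb =>
    if inb nr nc then
      whileA dx dy f (nr + dx) (nc + dy) (if get2 nb nr nc = 0 then set2 nb nr nc 2 else nb)
    else nb

def spread_seeds (board : List (List Int)) (direction : Int × Int) : List (List Int) :=
  (List.range 5).foldl (fun nb r =>
    (List.range 5).foldl (fun nb c =>
      if get2 board (r : Int) (c : Int) = 1 then
        whileA direction.1 direction.2 10 ((r : Int) + direction.1) ((c : Int) + direction.2) nb
      else nb) nb) board

-- ===== PORT B =====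
-- 'for k in range(1, 5): … break/return' of Source B; k counts up, rem is the remaining range length.
def pullB (board : List (List Int)) (dx dy i j : Int) : Nat → Nat → Bool
  | _, 0 => false
  | k, rem + 1 =>
    if inb (i - (k : Int) * dx) (j - (k : Int) * dy) then
      if get2 board (i - (k : Int) * dx) (j - (k : Int) * dy) = 1 then true
      else pullB board dx dy i j (k + 1) rem
    else false

def spread_seeds_alt (board : List (List Int)) (direction : Int × Int) : List (List Int) :=
  (List.range 5).foldl (fun nb r =>
    (List.range 5).foldl (fun nb c =>
      if get2 board (r : Int) (c : Int) = 0 then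
        (if pullB board direction.1 direction.2 (r : Int) (c : Int) 1 4 then
          set2 nb (r : Int) (c : Int) 2
        else nb)
      else nb) nb) board

-- ===== PRECONDITION & SPEC =====
-- Pre_ excludes exactly the inputs where Python A does not return: boards with fewer than 5 rows or
-- a short row among the first five (IndexError), and direction (0,0) with a seed on the 5×5 grid
-- (the while loop never terminates).
def Pre_spread_seeds (board : List (List Int)) (direction : Int × Int) : Prop :=
  5 ≤ board.length ∧ (∀ r : Nat, r < 5 → 5 ≤ (board.getD r []).length) ∧
  (direction = (0, 0) → ∀ r : Nat, r < 5 → ∀ c : Nat, c < 5 → get2 board (r : Int) (c : Int) ≠ 1)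

instance (board : List (List Int)) (direction : Int × Int) : Decidable (Pre_spread_seeds board direction) := by
  unfold Pre_spread_seeds; infer_instance

def pvWitness_spread_seeds : List (List Int) × (Int × Int) :=
  ([[1, 0, 0, 0, 0], [0, 0, 0, 0, 0], [0, 0, 2, 0, 0], [0, 1, 0, 0, 0], [0, 0, 0, 0, 0]], (1, 1))

def Spec_spread_seeds (board : List (List Int)) (direction : Int × Int) (out : List (List Int)) : Prop := out = spread_seeds_alt board direction
instance (board : List (List Int)) (direction : Int × Int) (out : List (List Int)) : Decidable (Spec_spread_seeds board direction out) := by unfold Spec_spread_seeds; infer_instance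

-- ===== CLAIM (what is proved, stated in full; the proofs are below) =====
def Claim_equal_spread_seeds : Prop := ∀ (board : List (List Int)) (direction : Int × Int), Dom_spread_seeds board direction → Pre_spread_seeds board direction → Spec_spread_seeds board direction (spread_seeds board direction)

-- ===== LEMMAS AND PROOFS =====

-- raw cell access by Nat indices
def rawget (b : List (List Int)) (n m : Nat) : Int := (b.getD n []).getD m 0

def SameShape (a b : List (List Int)) : Prop :=
  a.length = b.length ∧ ∀ n : Nat, (a.getD n []).length = (b.getD n []).length

-- "the forward walk started at (sr,sc) reaches (i,j) within f steps, all intermediate cells in bounds"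
def hits (dx dy : Int) (f : Nat) (sr sc i j : Int) : Bool :=
  (List.range f).any fun k =>
    decide (i = sr + (k : Int) * dx) && decide (j = sc + (k : Int) * dy) &&
    ((List.range (k + 1)).all fun m => inb (sr + (m : Int) * dx) (sc + (m : Int) * dy))

def stepA (board : List (List Int)) (dx dy : Int) (nb : List (List Int)) (p : Nat × Nat) : List (List Int) :=
  if get2 board (p.1 : Int) (p.2 : Int) = 1 then
    whileA dx dy 10 ((p.1 : Int) + dx) ((p.2 : Int) + dy) nb
  else nb

def allPs : List (Nat × Nat) := (List.range 5).flatMap (fun r => (List.range 5).map (fun c => (r, c)))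

def reachPs (board : List (List Int)) (dx dy : Int) (ps : List (Nat × Nat)) (i j : Int) : Bool :=
  ps.any fun p => decide (get2 board (p.1 : Int) (p.2 : Int) = 1) &&
    hits dx dy 10 ((p.1 : Int) + dx) ((p.2 : Int) + dy) i j

lemma reachPs_iff (board : List (List Int)) (dx dy : Int) (ps : List (Nat × Nat)) (i j : Int) :
    reachPs board dx dy ps i j = true ↔
      ∃ p ∈ ps, get2 board (p.1 : Int) (p.2 : Int) = 1 ∧
        hits dx dy 10 ((p.1 : Int) + dx) ((p.2 : Int) + dy) i j = true := by
  simp [reachPs, List.any_eq_true]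

lemma get2_natCast (b : List (List Int)) (n m : Nat) : get2 b (n : Int) (m : Int) = rawget b n m := by
  simp [get2, rawget]

lemma hits_iff (dx dy : Int) (f : Nat) (sr sc i j : Int) :
    hits dx dy f sr sc i j = true ↔
      ∃ k : Nat, k < f ∧ i = sr + (k : Int) * dx ∧ j = sc + (k : Int) * dy ∧
        ∀ m : Nat, m ≤ k → inb (sr + (m : Int) * dx) (sc + (m : Int) * dy) = true := by
  simp [hits, List.any_eq_true, List.all_eq_true, List.mem_range, and_assoc]

lemma inb_iff (r c : Int) : inb r c = true ↔ 0 ≤ r ∧ r < 5 ∧ 0 ≤ c ∧ c < 5 := by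
  simp [inb, and_assoc]

lemma hits_succ (dx dy : Int) (f : Nat) (sr sc i j : Int) (h : inb sr sc = true) :
    hits dx dy (f + 1) sr sc i j = true ↔
      ((i = sr ∧ j = sc) ∨ hits dx dy f (sr + dx) (sc + dy) i j = true) := by
  rw [hits_iff, hits_iff]
  constructor
  · rintro ⟨k, hk, hi, hj, hpre⟩
    cases k with
    | zero => left; constructor <;> [simpa using hi; simpa using hj]
    | succ t =>
      right
      refine ⟨t, by omega, by rw [hi]; push_cast; ring, by rw [hj]; push_cast; ring, fun m hm => ?_⟩
      have := hpre (m + 1) (by omega)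
      convert this using 2 <;> push_cast <;> ring
  · rintro (⟨hi, hj⟩ | ⟨k, hk, hi, hj, hpre⟩)
    · refine ⟨0, by omega, by simpa using hi, by simpa using hj, fun m hm => ?_⟩
      have : m = 0 := by omega
      subst this; simpa using h
    · refine ⟨k + 1, by omega, by rw [hi]; push_cast; ring, by rw [hj]; push_cast; ring,
        fun m hm => ?_⟩
      cases m with
      | zero => simpa using h
      | succ u =>
        have := hpre u (by omega)
        convert this using 2 <;> push_cast <;> ring

lemma pullB_iff (board : List (List Int)) (dx dy i j : Int) :
    ∀ (rem k : Nat), pullB board dx dy i j k rem = true ↔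
      ∃ t : Nat, k ≤ t ∧ t < k + rem ∧
        (∀ m : Nat, k ≤ m → m ≤ t → inb (i - (m : Int) * dx) (j - (m : Int) * dy) = true) ∧
        get2 board (i - (t : Int) * dx) (j - (t : Int) * dy) = 1 := by
  intro rem
  induction rem with
  | zero =>
    intro k
    simp only [pullB]
    constructor
    · intro h; cases h
    · rintro ⟨t, h1, h2, -⟩; omega
  | succ rem ih =>
    intro k
    by_cases hin : inb (i - (k : Int) * dx) (j - (k : Int) * dy) = true
    · by_cases hsrc : get2 board (i - (k : Int) * dx) (j - (k : Int) * dy) = 1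
      · simp only [pullB, hin, if_true, hsrc]
        constructor
        · intro _
          exact ⟨k, le_rfl, by omega, fun m hm1 hm2 => by
            have : m = k := le_antisymm hm2 hm1
            subst this; exact hin, hsrc⟩
        · intro _; trivial
      · simp only [pullB, hin, if_true, if_neg hsrc]
        rw [ih (k + 1)]
        constructor
        · rintro ⟨t, h1, h2, hpre, hs⟩
          refine ⟨t, by omega, by omega, fun m hm1 hm2 => ?_, hs⟩
          rcases eq_or_lt_of_le hm1 with h | h
          · subst h; exact hin
          · exact hpre m (by omega) hm2
        · rintro ⟨t, h1, h2, hpre, hs⟩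
          have ht : k + 1 ≤ t := by
            rcases eq_or_lt_of_le h1 with h | h
            · exfalso; subst h; exact hsrc hs
            · omega
          exact ⟨t, ht, by omega, fun m hm1 hm2 => hpre m (by omega) hm2, hs⟩
    · simp only [pullB, if_neg hin]
      constructor
      · intro h; cases h
      · rintro ⟨t, h1, h2, hpre, -⟩
        exact absurd (hpre k le_rfl h1) hin

lemma getD_set_row (l : List (List Int)) (t : Nat) (row : List Int) (n : Nat) :
    (l.set t row).getD n [] = if t = n ∧ t < l.length then row else l.getD n [] := by
  rcases eq_or_ne t n with h | h
  · subst h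
    by_cases ht : t < l.length
    · simp [List.getD_eq_getElem?_getD, ht]
    · simp [List.set_eq_of_length_le (Nat.le_of_not_lt ht), ht]
  · simp [List.getD_eq_getElem?_getD, List.getElem?_set_ne h, h]

lemma getD_set_cell (l : List Int) (t : Nat) (x : Int) (n : Nat) :
    (l.set t x).getD n 0 = if t = n ∧ t < l.length then x else l.getD n 0 := by
  rcases eq_or_ne t n with h | h
  · subst h
    by_cases ht : t < l.length
    · simp [List.getD_eq_getElem?_getD, ht]
    · simp [List.set_eq_of_length_le (Nat.le_of_not_lt ht), ht]
  · simp [List.getD_eq_getElem?_getD, List.getElem?_set_ne h, h]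

lemma length_set2 (b : List (List Int)) (r c v : Int) : (set2 b r c v).length = b.length := by
  simp [set2]

lemma rawget_set2_self (b : List (List Int)) (r c v : Int)
    (hn : r.toNat < b.length) (hm : c.toNat < (b.getD r.toNat []).length) :
    rawget (set2 b r c v) r.toNat c.toNat = v := by
  unfold rawget set2
  rw [getD_set_row, if_pos ⟨rfl, hn⟩, getD_set_cell, if_pos ⟨rfl, hm⟩]

lemma rawget_set2_other (b : List (List Int)) (r c v : Int) (n m : Nat)
    (h : n ≠ r.toNat ∨ m ≠ c.toNat) :
    rawget (set2 b r c v) n m = rawget b n m := by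
  unfold rawget set2
  rw [getD_set_row]
  rcases h with h | h
  · rw [if_neg (by tauto)]
  · split_ifs with h2
    · obtain ⟨h2, _⟩ := h2; subst h2
      rw [getD_set_cell, if_neg (by tauto)]
    · rfl

lemma sameShape_set2 (b : List (List Int)) (r c v : Int) : SameShape (set2 b r c v) b := by
  refine ⟨length_set2 b r c v, fun n => ?_⟩
  unfold set2
  rw [getD_set_row]
  split_ifs with h2
  · obtain ⟨h2, _⟩ := h2; subst h2; simp
  · rfl

lemma sameShape_trans {a b c : List (List Int)} (h1 : SameShape a b) (h2 : SameShape b c) : SameShape a c :=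
  ⟨h1.1.trans h2.1, fun n => (h1.2 n).trans (h2.2 n)⟩

lemma whileA_char (board : List (List Int))
    (hb : 5 ≤ board.length ∧ ∀ r : Nat, r < 5 → 5 ≤ (board.getD r []).length) (dx dy : Int) :
    ∀ (f : Nat) (sr sc : Int) (nb : List (List Int)), SameShape nb board →
      SameShape (whileA dx dy f sr sc nb) board ∧
      (∀ n m : Nat, ¬(n < 5 ∧ m < 5) → rawget (whileA dx dy f sr sc nb) n m = rawget nb n m) ∧
      (∀ i j : Int, inb i j = true →
        get2 (whileA dx dy f sr sc nb) i j =
          if get2 nb i j = 0 ∧ hits dx dy f sr sc i j = true then 2 else get2 nb i j) := by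
  intro f
  induction f with
  | zero =>
    intro sr sc nb hnb
    refine ⟨hnb, fun n m _ => rfl, fun i j hij => ?_⟩
    have hcond : ¬(get2 nb i j = 0 ∧ hits dx dy 0 sr sc i j = true) := by
      rintro ⟨-, hh⟩
      rw [hits_iff] at hh
      obtain ⟨k, hk, -⟩ := hh
      omega
    rw [if_neg hcond]
    rfl
  | succ f ih =>
    intro sr sc nb hnb
    by_cases hin : inb sr sc = true
    · have hb5 := (inb_iff _ _).mp hin
      obtain ⟨hb1, hb2, hb3, hb4⟩ := hb5
      have hrow : sr.toNat < nb.length := by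
        have := hnb.1; have := hb.1; omega
      have hcol : sc.toNat < (nb.getD sr.toNat []).length := by
        have h1 := hnb.2 sr.toNat
        have h2 := hb.2 sr.toNat (by omega)
        omega
      have step : whileA dx dy (f + 1) sr sc nb
          = whileA dx dy f (sr + dx) (sc + dy)
              (if get2 nb sr sc = 0 then set2 nb sr sc 2 else nb) := by
        simp only [whileA, hin, if_true]
      set nb1 := (if get2 nb sr sc = 0 then set2 nb sr sc 2 else nb) with hnb1def
      have hnb1 : SameShape nb1 board := by
        rw [hnb1def]; split_ifs
        · exact sameShape_trans (sameShape_set2 _ _ _ _) hnb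
        · exact hnb
      obtain ⟨S, R, P⟩ := ih (sr + dx) (sc + dy) nb1 hnb1
      rw [step]
      refine ⟨S, fun n m hnm => ?_, fun i j hij => ?_⟩
      · rw [R n m hnm, hnb1def]
        split_ifs with h0
        · exact rawget_set2_other nb sr sc 2 n m (by omega)
        · rfl
      · rw [P i j hij]
        obtain ⟨hi1, hi2, hi3, hi4⟩ := (inb_iff _ _).mp hij
        have hget1 : get2 nb1 i j
            = if i = sr ∧ j = sc ∧ get2 nb sr sc = 0 then 2 else get2 nb i j := by
          rw [hnb1def]
          by_cases h0 : get2 nb sr sc = 0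
          · rw [if_pos h0]
            by_cases hsame : i = sr ∧ j = sc
            · obtain ⟨e1, e2⟩ := hsame
              rw [if_pos ⟨e1, e2, h0⟩, e1, e2]
              exact rawget_set2_self nb sr sc 2 hrow hcol
            · rw [if_neg (by tauto)]
              refine rawget_set2_other nb sr sc 2 i.toNat j.toNat ?_
              rcases not_and_or.mp hsame with h | h
              · left; omega
              · right; omega
          · rw [if_neg h0, if_neg (by tauto)]
        rw [hget1]
        have hs := hits_succ dx dy f sr sc i j hin
        by_cases hsame : i = sr ∧ j = sc
        · by_cases h0 : get2 nb sr sc = 0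
          · have e : (if i = sr ∧ j = sc ∧ get2 nb sr sc = 0 then (2 : Int) else get2 nb i j) = 2 :=
              if_pos ⟨hsame.1, hsame.2, h0⟩
            rw [e, if_neg (by rintro ⟨h2, -⟩; norm_num at h2),
              if_pos ⟨by rw [hsame.1, hsame.2]; exact h0, hs.mpr (Or.inl hsame)⟩]
          · have e : (if i = sr ∧ j = sc ∧ get2 nb sr sc = 0 then (2 : Int) else get2 nb i j)
                = get2 nb i j := if_neg (by tauto)
            have hvne : get2 nb i j ≠ 0 := by rw [hsame.1, hsame.2]; exact h0
            rw [e, if_neg (by tauto), if_neg (by tauto)]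
        · have e : (if i = sr ∧ j = sc ∧ get2 nb sr sc = 0 then (2 : Int) else get2 nb i j)
              = get2 nb i j := if_neg (by tauto)
          rw [e]
          by_cases hv : get2 nb i j = 0
          · by_cases hh : hits dx dy f (sr + dx) (sc + dy) i j = true
            · rw [if_pos ⟨hv, hh⟩, if_pos ⟨hv, hs.mpr (Or.inr hh)⟩]
            · rw [if_neg (by tauto),
                if_neg (by rintro ⟨-, h⟩; rcases hs.mp h with h' | h'
                           exacts [hsame h', hh h'])]
          · rw [if_neg (by tauto), if_neg (by tauto)]
    · have step : whileA dx dy (f + 1) sr sc nb = nb := by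
        simp only [whileA, if_neg hin]
      rw [step]
      refine ⟨hnb, fun n m _ => rfl, fun i j hij => ?_⟩
      have hcond : ¬(get2 nb i j = 0 ∧ hits dx dy (f + 1) sr sc i j = true) := by
        rintro ⟨-, hh⟩
        rw [hits_iff] at hh
        obtain ⟨k, -, -, -, hpre⟩ := hh
        have h0 := hpre 0 (by omega)
        simp only [Nat.cast_zero, zero_mul, add_zero] at h0
        exact hin h0
      rw [if_neg hcond]

lemma procList_char (board : List (List Int))
    (hb : 5 ≤ board.length ∧ ∀ r : Nat, r < 5 → 5 ≤ (board.getD r []).length) (dx dy : Int) :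
    ∀ (ps : List (Nat × Nat)), ∀ nb, SameShape nb board →
      SameShape (ps.foldl (stepA board dx dy) nb) board ∧
      (∀ n m : Nat, ¬(n < 5 ∧ m < 5) → rawget (ps.foldl (stepA board dx dy) nb) n m = rawget nb n m) ∧
      (∀ i j : Int, inb i j = true →
        get2 (ps.foldl (stepA board dx dy) nb) i j =
          if get2 nb i j = 0 ∧ reachPs board dx dy ps i j = true then 2 else get2 nb i j) := by
  intro ps
  induction ps with
  | nil =>
    intro nb hnb
    refine ⟨hnb, fun n m _ => rfl, fun i j hij => ?_⟩
    have hcond : ¬(get2 nb i j = 0 ∧ reachPs board dx dy [] i j = true) := by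
      rintro ⟨-, hh⟩; simp [reachPs] at hh
    rw [if_neg hcond]
    rfl
  | cons p ps ih =>
    intro nb hnb
    have hfold : (p :: ps).foldl (stepA board dx dy) nb
        = ps.foldl (stepA board dx dy) (stepA board dx dy nb p) := rfl
    rw [hfold]
    by_cases hsrc : get2 board (p.1 : Int) (p.2 : Int) = 1
    · have hstep : stepA board dx dy nb p
          = whileA dx dy 10 ((p.1 : Int) + dx) ((p.2 : Int) + dy) nb := by
        unfold stepA; rw [if_pos hsrc]
      obtain ⟨S1, R1, P1⟩ := whileA_char board hb dx dy 10 ((p.1 : Int) + dx) ((p.2 : Int) + dy) nb hnb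
      rw [hstep]
      obtain ⟨S, R, P⟩ := ih (whileA dx dy 10 ((p.1 : Int) + dx) ((p.2 : Int) + dy) nb) S1
      refine ⟨S, fun n m hnm => ?_, fun i j hij => ?_⟩
      · rw [R n m hnm, R1 n m hnm]
      · rw [P i j hij, P1 i j hij]
        have hreach : reachPs board dx dy (p :: ps) i j = true ↔
            (hits dx dy 10 ((p.1 : Int) + dx) ((p.2 : Int) + dy) i j = true ∨
              reachPs board dx dy ps i j = true) := by
          rw [reachPs_iff]
          constructor
          · rintro ⟨q, hq, hq1, hq2⟩
            rcases List.mem_cons.mp hq with h | h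
            · subst h; exact Or.inl hq2
            · right; rw [reachPs_iff]; exact ⟨q, h, hq1, hq2⟩
          · rintro (h | h)
            · exact ⟨p, List.mem_cons_self, hsrc, h⟩
            · rw [reachPs_iff] at h
              obtain ⟨q, hq, hq1, hq2⟩ := h
              exact ⟨q, List.mem_cons_of_mem _ hq, hq1, hq2⟩
        by_cases hv : get2 nb i j = 0
        · by_cases hh : hits dx dy 10 ((p.1 : Int) + dx) ((p.2 : Int) + dy) i j = true
          · have e : (if get2 nb i j = 0 ∧
                hits dx dy 10 ((p.1 : Int) + dx) ((p.2 : Int) + dy) i j = true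
                then (2 : Int) else get2 nb i j) = 2 := if_pos ⟨hv, hh⟩
            rw [e, if_neg (by rintro ⟨h2, -⟩; norm_num at h2),
              if_pos ⟨hv, hreach.mpr (Or.inl hh)⟩]
          · have e : (if get2 nb i j = 0 ∧
                hits dx dy 10 ((p.1 : Int) + dx) ((p.2 : Int) + dy) i j = true
                then (2 : Int) else get2 nb i j) = get2 nb i j := if_neg (by tauto)
            rw [e]
            by_cases hr : reachPs board dx dy ps i j = true
            · rw [if_pos ⟨hv, hr⟩, if_pos ⟨hv, hreach.mpr (Or.inr hr)⟩]
            · rw [if_neg (by tauto),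
                if_neg (by rintro ⟨-, h⟩; rcases hreach.mp h with h' | h'
                           exacts [hh h', hr h'])]
        · have e : (if get2 nb i j = 0 ∧
              hits dx dy 10 ((p.1 : Int) + dx) ((p.2 : Int) + dy) i j = true
              then (2 : Int) else get2 nb i j) = get2 nb i j := if_neg (by tauto)
          rw [e, if_neg (by tauto), if_neg (by tauto)]
    · have hstep : stepA board dx dy nb p = nb := by
        unfold stepA; rw [if_neg hsrc]
      rw [hstep]
      obtain ⟨S, R, P⟩ := ih nb hnb
      refine ⟨S, R, fun i j hij => ?_⟩
      rw [P i j hij]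
      have hreach : reachPs board dx dy (p :: ps) i j = reachPs board dx dy ps i j := by
        simp [reachPs, List.any_cons, hsrc]
      rw [hreach]

lemma mem_allPs (p : Nat × Nat) : p ∈ allPs ↔ p.1 < 5 ∧ p.2 < 5 := by
  obtain ⟨a, b⟩ := p
  simp [allPs, List.mem_flatMap, List.mem_map, List.mem_range]

lemma spread_eq_procList (board : List (List Int)) (d : Int × Int) :
    spread_seeds board d = allPs.foldl (stepA board d.1 d.2) board := by
  simp [spread_seeds, allPs, stepA, List.foldl_flatMap, List.foldl_map]

def stepB (board : List (List Int)) (dx dy : Int) (nb : List (List Int)) (p : Nat × Nat) : List (List Int) :=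
  if get2 board (p.1 : Int) (p.2 : Int) = 0 then
    (if pullB board dx dy (p.1 : Int) (p.2 : Int) 1 4 then set2 nb (p.1 : Int) (p.2 : Int) 2 else nb)
  else nb

lemma alt_eq_procB (board : List (List Int)) (d : Int × Int) :
    spread_seeds_alt board d = allPs.foldl (stepB board d.1 d.2) board := by
  simp [spread_seeds_alt, allPs, stepB, List.foldl_flatMap, List.foldl_map]

def memHits (qs : List (Nat × Nat)) (i j : Int) : Bool :=
  qs.any fun q => decide ((q.1 : Int) = i) && decide ((q.2 : Int) = j)

lemma memHits_cons (q : Nat × Nat) (qs : List (Nat × Nat)) (i j : Int) :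
    memHits (q :: qs) i j = true ↔
      (((q.1 : Int) = i ∧ (q.2 : Int) = j) ∨ memHits qs i j = true) := by
  simp [memHits, List.any_cons]

lemma procB_char (board : List (List Int))
    (hb : 5 ≤ board.length ∧ ∀ r : Nat, r < 5 → 5 ≤ (board.getD r []).length) (dx dy : Int) :
    ∀ (qs : List (Nat × Nat)), (∀ q ∈ qs, q.1 < 5 ∧ q.2 < 5) → ∀ nb, SameShape nb board →
      SameShape (qs.foldl (stepB board dx dy) nb) board ∧
      (∀ n m : Nat, ¬(n < 5 ∧ m < 5) → rawget (qs.foldl (stepB board dx dy) nb) n m = rawget nb n m) ∧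
      (∀ i j : Int, inb i j = true →
        get2 (qs.foldl (stepB board dx dy) nb) i j =
          if memHits qs i j = true ∧ get2 board i j = 0 ∧ pullB board dx dy i j 1 4 = true
          then 2 else get2 nb i j) := by
  intro qs
  induction qs with
  | nil =>
    intro _ nb hnb
    refine ⟨hnb, fun n m _ => rfl, fun i j hij => ?_⟩
    have hcond : ¬(memHits [] i j = true ∧ get2 board i j = 0 ∧
        pullB board dx dy i j 1 4 = true) := by
      rintro ⟨hh, -⟩; simp [memHits] at hh
    rw [if_neg hcond]
    rfl
  | cons q qs ih =>
    intro hqs nb hnb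
    have hq5 : q.1 < 5 ∧ q.2 < 5 := hqs q List.mem_cons_self
    have hfold : (q :: qs).foldl (stepB board dx dy) nb
        = qs.foldl (stepB board dx dy) (stepB board dx dy nb q) := rfl
    rw [hfold]
    set nb1 := stepB board dx dy nb q with hnb1def
    have hnb1 : SameShape nb1 board := by
      rw [hnb1def]; unfold stepB
      split_ifs
      · exact sameShape_trans (sameShape_set2 _ _ _ _) hnb
      · exact hnb
      · exact hnb
    obtain ⟨S, R, P⟩ := ih (fun q' hq' => hqs q' (List.mem_cons_of_mem _ hq')) nb1 hnb1
    refine ⟨S, fun n m hnm => ?_, fun i j hij => ?_⟩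
    · rw [R n m hnm, hnb1def]
      unfold stepB
      split_ifs
      · exact rawget_set2_other nb _ _ 2 n m (by omega)
      · rfl
      · rfl
    · rw [P i j hij]
      obtain ⟨hi1, hi2, hi3, hi4⟩ := (inb_iff _ _).mp hij
      have hrow : (q.1 : Int).toNat < nb.length := by
        have := hnb.1; have := hb.1; omega
      have hcol : (q.2 : Int).toNat < (nb.getD (q.1 : Int).toNat []).length := by
        have h1 := hnb.2 (q.1 : Int).toNat
        have h2 := hb.2 (q.1 : Int).toNat (by omega)
        omega
      have hnb1val : get2 nb1 i j
          = if ((q.1 : Int) = i ∧ (q.2 : Int) = j) ∧ get2 board i j = 0 ∧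
              pullB board dx dy i j 1 4 = true
            then 2 else get2 nb i j := by
        rw [hnb1def]
        unfold stepB
        by_cases hqij : (q.1 : Int) = i ∧ (q.2 : Int) = j
        · obtain ⟨e1, e2⟩ := hqij
          by_cases hv : get2 board i j = 0
          · by_cases hp : pullB board dx dy i j 1 4 = true
            · rw [if_pos (by rw [e1, e2]; exact hv), if_pos (by rw [e1, e2]; exact hp),
                if_pos ⟨⟨e1, e2⟩, hv, hp⟩]
              rw [← e1, ← e2]
              exact rawget_set2_self nb _ _ 2 hrow hcol
            · rw [if_pos (by rw [e1, e2]; exact hv), if_neg (by rw [e1, e2]; exact hp),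
                if_neg (by rintro ⟨-, -, hx⟩; exact hp hx)]
          · rw [if_neg (by rw [e1, e2]; exact hv), if_neg (by rintro ⟨-, hx, -⟩; exact hv hx)]
        · have hne : i.toNat ≠ (q.1 : Int).toNat ∨ j.toNat ≠ (q.2 : Int).toNat := by
            rcases not_and_or.mp hqij with h | h
            · left; omega
            · right; omega
          have hother : get2 (set2 nb (q.1 : Int) (q.2 : Int) 2) i j = get2 nb i j :=
            rawget_set2_other nb _ _ 2 i.toNat j.toNat hne
          conv_rhs => rw [if_neg (fun hc => hqij hc.1)]
          split_ifs
          · exact hother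
          · rfl
          · rfl
      rw [hnb1val]
      have hm := memHits_cons q qs i j
      split_ifs <;> first | rfl | tauto

lemma eq_of_shape_raw (board X Y : List (List Int)) (hx : SameShape X board)
    (hy : SameShape Y board) (h : ∀ n m : Nat, rawget X n m = rawget Y n m) : X = Y := by
  apply List.ext_getElem (hx.1.trans hy.1.symm)
  intro n h1 h2
  apply List.ext_getElem
  · have hlen := (hx.2 n).trans (hy.2 n).symm
    rwa [List.getD_eq_getElem X [] h1, List.getD_eq_getElem Y [] h2] at hlen
  · intro m hm1 hm2
    have hv := h n m
    unfold rawget at hv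
    rwa [List.getD_eq_getElem X [] h1, List.getD_eq_getElem Y [] h2,
      List.getD_eq_getElem _ 0 hm1, List.getD_eq_getElem _ 0 hm2] at hv

lemma step_bound {t : Nat} {d a b : Int} (hd : d ≠ 0) (h : b = a + (t : Int) * d)
    (ha : 0 ≤ a) (ha' : a < 5) (hb0 : 0 ≤ b) (hb' : b < 5) : t ≤ 4 := by
  rcases lt_or_gt_of_ne hd with h1 | h1
  · have h2 : (t : Int) * d ≤ (t : Int) * (-1) :=
      mul_le_mul_of_nonneg_left (by omega) (by positivity)
    have ht : (t : Int) ≤ 4 := by linarith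
    exact_mod_cast ht
  · have h2 : (t : Int) * 1 ≤ (t : Int) * d :=
      mul_le_mul_of_nonneg_left (by omega) (by positivity)
    have ht : (t : Int) ≤ 4 := by linarith
    exact_mod_cast ht

lemma reach_iff_pull (board : List (List Int)) (dx dy i j : Int)
    (hij : inb i j = true) (h0 : get2 board i j = 0) :
    reachPs board dx dy allPs i j = true ↔ pullB board dx dy i j 1 4 = true := by
  obtain ⟨hi1, hi2, hi3, hi4⟩ := (inb_iff _ _).mp hij
  constructor
  · intro h
    rw [reachPs_iff] at h
    obtain ⟨p, hp, hsrc, hh⟩ := h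
    rw [mem_allPs] at hp
    rw [hits_iff] at hh
    obtain ⟨k, hk10, hi, hj, hpre⟩ := hh
    have hp1 : (0 : Int) ≤ (p.1 : Int) ∧ (p.1 : Int) < 5 := by
      constructor
      · positivity
      · exact_mod_cast hp.1
    have hp2 : (0 : Int) ≤ (p.2 : Int) ∧ (p.2 : Int) < 5 := by
      constructor
      · positivity
      · exact_mod_cast hp.2
    have hi' : i = (p.1 : Int) + ((k + 1 : Nat) : Int) * dx := by
      rw [hi]; push_cast; ring
    have hj' : j = (p.2 : Int) + ((k + 1 : Nat) : Int) * dy := by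
      rw [hj]; push_cast; ring
    have ht4 : k + 1 ≤ 4 := by
      by_cases hdx : dx = 0
      · by_cases hdy : dy = 0
        · exfalso
          have e1 : i = (p.1 : Int) := by rw [hi', hdx]; ring
          have e2 : j = (p.2 : Int) := by rw [hj', hdy]; ring
          rw [e1, e2, hsrc] at h0
          norm_num at h0
        · exact step_bound hdy hj' hp2.1 hp2.2 hi3 hi4
      · exact step_bound hdx hi' hp1.1 hp1.2 hi1 hi2
    rw [pullB_iff]
    refine ⟨k + 1, by omega, by omega, fun m hm1 hm2 => ?_, ?_⟩
    · have harg1 : i - (m : Int) * dx = (p.1 : Int) + ((k + 1 - m : Nat) : Int) * dx := by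
        rw [hi']; push_cast [Nat.cast_sub hm2]; ring
      have harg2 : j - (m : Int) * dy = (p.2 : Int) + ((k + 1 - m : Nat) : Int) * dy := by
        rw [hj']; push_cast [Nat.cast_sub hm2]; ring
      rcases Nat.eq_zero_or_pos (k + 1 - m) with hu | hu
      · rw [harg1, harg2, hu]
        simp only [Nat.cast_zero, zero_mul, add_zero]
        rw [inb_iff]
        exact ⟨hp1.1, hp1.2, hp2.1, hp2.2⟩
      · have hle : k + 1 - m - 1 ≤ k := by omega
        have := hpre (k + 1 - m - 1) hle
        rw [harg1, harg2]
        convert this using 2 <;> push_cast [Nat.cast_sub (by omega : 1 ≤ k + 1 - m)] <;> ring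
    · have harg1 : i - ((k + 1 : Nat) : Int) * dx = (p.1 : Int) := by rw [hi']; ring
      have harg2 : j - ((k + 1 : Nat) : Int) * dy = (p.2 : Int) := by rw [hj']; ring
      rw [harg1, harg2]
      exact hsrc
  · intro h
    rw [pullB_iff] at h
    obtain ⟨t, ht1, ht5, hpre, hsrc⟩ := h
    have hq := hpre t ht1 le_rfl
    obtain ⟨hq1, hq2, hq3, hq4⟩ := (inb_iff _ _).mp hq
    have hca : (((i - (t : Int) * dx).toNat : Int)) = i - (t : Int) * dx := Int.toNat_of_nonneg hq1
    have hcb : (((j - (t : Int) * dy).toNat : Int)) = j - (t : Int) * dy := Int.toNat_of_nonneg hq3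
    rw [reachPs_iff]
    refine ⟨((i - (t : Int) * dx).toNat, (j - (t : Int) * dy).toNat), ?_, ?_, ?_⟩
    · rw [mem_allPs]
      constructor <;> [omega; omega]
    · simpa only [hca, hcb] using hsrc
    · rw [hits_iff]
      refine ⟨t - 1, by omega, ?_, ?_, fun m hm => ?_⟩
      · rw [hca]; push_cast [Nat.cast_sub ht1]; ring
      · rw [hcb]; push_cast [Nat.cast_sub ht1]; ring
      · have harg1 : ((i - (t : Int) * dx).toNat : Int) + dx + (m : Int) * dx
            = i - ((t - 1 - m : Nat) : Int) * dx := by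
          rw [hca]; push_cast [Nat.cast_sub (by omega : m ≤ t - 1), Nat.cast_sub ht1]; ring
        have harg2 : ((j - (t : Int) * dy).toNat : Int) + dy + (m : Int) * dy
            = j - ((t - 1 - m : Nat) : Int) * dy := by
          rw [hcb]; push_cast [Nat.cast_sub (by omega : m ≤ t - 1), Nat.cast_sub ht1]; ring
        rw [harg1, harg2]
        rcases Nat.eq_zero_or_pos (t - 1 - m) with hu | hu
        · rw [hu]
          simp only [Nat.cast_zero, zero_mul, sub_zero]
          exact hij
        · exact hpre (t - 1 - m) (by omega) (by omega)

-- ===== VERDICT (by name: the statement is the Claim_ definition above) =====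
theorem spread_seeds_spec : Claim_equal_spread_seeds := by
  intro board direction hdom hpre
  unfold Spec_spread_seeds
  obtain ⟨dx, dy⟩ := direction
  obtain ⟨hL, hRr, -⟩ := hpre
  -- (the third Pre_ clause is not needed for the value equality: it only rules out the inputs on
  -- which Python A's while loop never terminates, so that A returns at all)
  have hb : 5 ≤ board.length ∧ ∀ r : Nat, r < 5 → 5 ≤ (board.getD r []).length := ⟨hL, hRr⟩
  obtain ⟨SA, RA, PA⟩ := procList_char board hb dx dy allPs board ⟨rfl, fun n => rfl⟩
  obtain ⟨SB, RB, PB⟩ := procB_char board hb dx dy allPs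
    (fun q hq => (mem_allPs q).mp hq) board ⟨rfl, fun n => rfl⟩
  rw [spread_eq_procList, alt_eq_procB]
  apply eq_of_shape_raw board _ _ SA SB
  intro n m
  by_cases hnm : n < 5 ∧ m < 5
  · have hinb : inb (n : Int) (m : Int) = true := by
      rw [inb_iff]
      refine ⟨by positivity, by exact_mod_cast hnm.1, by positivity, by exact_mod_cast hnm.2⟩
    rw [← get2_natCast, ← get2_natCast, PA (n : Int) (m : Int) hinb, PB (n : Int) (m : Int) hinb]
    have hmem : memHits allPs (n : Int) (m : Int) = true := by
      simp only [memHits, List.any_eq_true]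
      exact ⟨(n, m), (mem_allPs _).mpr hnm, by simp⟩
    by_cases hv : get2 board (n : Int) (m : Int) = 0
    · have hiff := reach_iff_pull board dx dy (n : Int) (m : Int) hinb hv
      by_cases hp : pullB board dx dy (n : Int) (m : Int) 1 4 = true
      · rw [if_pos ⟨hv, hiff.mpr hp⟩, if_pos ⟨hmem, hv, hp⟩]
      · rw [if_neg (by rintro ⟨-, hr⟩; exact hp (hiff.mp hr)), if_neg (by tauto)]
    · rw [if_neg (by tauto), if_neg (by tauto)]
  · rw [RA n m hnm, RB n m hnm]
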